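-- pv_equiv track=rewrite | github.com/ryanpcooper/aoc_2022 | day25.py | find_first_digit
-- ===== SOURCE A (Python) =====
-- SNAFU_DIGITS = {
-- 	"2":  2,
-- 	"1":  1,
-- 	"0":  0,
-- 	"-": -1,
-- 	"=": -2
-- }
--
-- def parse_snafu(val):
-- 	total = 0
-- 	for i in range(len(val)):
-- 		c = val[i]
-- 		digit = SNAFU_DIGITS[c]
-- 		place = 5**(len(val)-1-i)
-- 		part = place*digit
-- 		total += part
-- 	return total
--
-- def find_first_digit(val, number_of_places):
-- 	place = (5**(number_of_places-1))
-- 	for option in SNAFU_DIGITS.keys():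
-- 		guess = ''+option
-- 		for i in range(number_of_places-1):
-- 			guess += '='
-- 		if parse_snafu(guess) <= val:
-- 			return option
-- ===== SOURCE B (Python) =====
-- SNAFU_VALUES = {2: "2", 1: "1", 0: "0", -1: "-", -2: "="}
--
-- def find_first_digit(val, number_of_places):
-- 	# minimal value representable with leading digit d is d*P - S,
-- 	# where P = 5**(places-1) and S = (P-1)//2 is the magnitude of the all-'=' tail;
-- 	# so the answer is d = (val + S) // P, clamped above at 2, None below -2.
-- 	place = 5 ** max(number_of_places - 1, 0)
-- 	tail = (place - 1) // 2
-- 	digit = (val + tail) // place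
-- 	if digit > 2:
-- 		return "2"
-- 	return SNAFU_VALUES.get(digit)
-- ===== Notes on version B (the rewrite author's own statement) =====
-- stated objective: faster
-- what changed: Replaces the 5-candidate search that rebuilds and re-parses an all-'=' SNAFU string for each candidate with one closed-form floor division (val + (P-1)//2) // P, P = 5**(places-1), followed by a clamp and a reverse-digit lookup.
import Mathlib
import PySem

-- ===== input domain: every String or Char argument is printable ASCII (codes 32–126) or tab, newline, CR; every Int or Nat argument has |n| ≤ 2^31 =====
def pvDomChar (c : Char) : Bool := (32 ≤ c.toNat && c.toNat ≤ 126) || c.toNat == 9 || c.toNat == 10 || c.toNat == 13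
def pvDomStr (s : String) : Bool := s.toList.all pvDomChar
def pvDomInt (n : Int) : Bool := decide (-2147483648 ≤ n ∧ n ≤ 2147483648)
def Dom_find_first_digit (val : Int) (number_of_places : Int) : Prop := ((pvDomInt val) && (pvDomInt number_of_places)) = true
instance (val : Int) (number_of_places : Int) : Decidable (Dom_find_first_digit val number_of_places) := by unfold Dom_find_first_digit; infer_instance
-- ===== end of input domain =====

-- B replaces A's five-candidate search (each candidate building and re-parsing an all-'=' SNAFU
-- string) with one closed-form floor division; equivalence of the two is proved for all inputs.

-- ===== PORT A =====
-- Python's one-character strings (the dict keys, s[i]) are represented as Char, matching PySem.Str.pyGet?.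
def SNAFU_DIGITS : PySem.Dict Char Int :=
  PySem.Dict.ofList [('2', 2), ('1', 1), ('0', 0), ('-', -1), ('=', -2)]

def parse_snafu (val : String) : Int :=
  (PySem.List.pyRange 0 (PySem.Str.len val) 1).foldl
    (fun total i =>
      let c := (PySem.Str.pyGet? val i).getD ' '      -- i ∈ range(len(val)): always in range
      let digit := (SNAFU_DIGITS.get? c).getD 0       -- KeyError unreachable: the guesses A builds use only SNAFU digits
      let place := (5 : Int) ^ (PySem.Str.len val - 1 - i).toNat
      total + place * digit) 0

def find_first_digit_loop (val : Int) (number_of_places : Int) : List Char → Option String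
  | [] => none
  | option :: rest =>
    let guess := (PySem.List.pyRange 0 (number_of_places - 1) 1).foldl
      (fun g _ => g ++ "=") ("" ++ String.ofList [option])
    if parse_snafu guess ≤ val then some (String.ofList [option])
    else find_first_digit_loop val number_of_places rest

def find_first_digit (val : Int) (number_of_places : Int) : Option String :=
  -- A computes 'place = 5**(number_of_places-1)' and never uses it (a float when the exponent
  -- is negative); omitted here as dead code
  find_first_digit_loop val number_of_places SNAFU_DIGITS.keys

-- ===== PORT B =====
def SNAFU_VALUES : PySem.Dict Int String :=
  PySem.Dict.ofList [(2, "2"), (1, "1"), (0, "0"), (-1, "-"), (-2, "=")]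

def find_first_digit_alt (val : Int) (number_of_places : Int) : Option String :=
  let place : Int := 5 ^ (max (number_of_places - 1) 0).toNat
  let tail := PySem.Int.floordiv (place - 1) 2
  let digit := PySem.Int.floordiv (val + tail) place
  if digit > 2 then some "2" else SNAFU_VALUES.get? digit

-- ===== PRECONDITION & SPEC =====
def Spec_find_first_digit (val : Int) (number_of_places : Int) (out : Option String) : Prop := out = find_first_digit_alt val number_of_places
instance (val : Int) (number_of_places : Int) (out : Option String) : Decidable (Spec_find_first_digit val number_of_places out) := by unfold Spec_find_first_digit; infer_instance

-- ===== CLAIM (what is proved, stated in full; the proofs are below) =====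
def Claim_equal_find_first_digit : Prop := ∀ (val : Int) (number_of_places : Int), Dom_find_first_digit val number_of_places → Spec_find_first_digit val number_of_places (find_first_digit val number_of_places)

-- ===== LEMMAS AND PROOFS =====

-- digit value of a character, as A's parse loop reads it
def pvDig (c : Char) : Int := (SNAFU_DIGITS.get? c).getD 0

-- Horner form of A's place-value sum
def pvHorner (cs : List Char) : Int := cs.foldl (fun t c => 5 * t + pvDig c) 0

-- magnitude of the all-'=' tail: pvTail k = (5^k - 1)/2
def pvTail : Nat → Int
  | 0 => 0
  | k + 1 => 5 * pvTail k + 2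

lemma pvTail_two_mul (k : Nat) : 2 * pvTail k = 5 ^ k - 1 := by
  induction k with
  | zero => simp [pvTail]
  | succ k ih => rw [pvTail]; ring_nf; ring_nf at ih; omega

lemma pvTail_floordiv (k : Nat) :
    PySem.Int.floordiv ((5 : Int) ^ k - 1) 2 = pvTail k := by
  have h := pvTail_two_mul k
  rw [(PySem.Int.floordiv_eq_iff_of_pos (a := (5:Int)^k - 1) (b := 2) (q := pvTail k) (by omega))]
  omega

lemma pvGuess_eq (l : List Int) (g : String) :
    l.foldl (fun g _ => g ++ "=") g = String.ofList (g.toList ++ List.replicate l.length '=') := by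
  induction l generalizing g with
  | nil => simp [String.ofList_toList]
  | cons x xs ih =>
      simp only [List.foldl_cons, ih, List.length_cons, List.replicate_succ]
      congr 1
      simp

lemma pvRange_zero (m : Int) :
    PySem.List.pyRange 0 m 1 = (List.range m.toNat).map (fun (k : Nat) => (k : Int)) := by
  rcases le_or_gt m 0 with h | h
  · have h1 : PySem.List.pyRange 0 m 1 = [] := by simp [PySem.List.pyRange]; omega
    have h2 : m.toNat = 0 := by omega
    simp [h1, h2]
  · obtain ⟨a, rfl⟩ : ∃ a : Nat, m = (a : Int) := ⟨m.toNat, by omega⟩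
    rw [PySem.List.pyRange_zero_natCast, Int.toNat_natCast]

lemma pvSum_eq_horner (cs : List Char) :
    ((List.range cs.length).map
      (fun (k : Nat) => (5 : Int) ^ ((cs.length : Int) - 1 - (k : Int)).toNat * pvDig (cs[k]?.getD ' '))).sum
    = pvHorner cs := by
  induction cs using List.reverseRecOn with
  | nil => simp [pvHorner]
  | append_singleton cs c ih =>
      simp only [pvHorner] at ih ⊢
      rw [List.length_append, List.length_singleton, List.range_succ, List.map_append, List.sum_append]
      have hterm : ∀ k ∈ List.range cs.length,
          (5 : Int) ^ (((cs.length + 1 : Nat) : Int) - 1 - (k : Int)).toNat * pvDig ((cs ++ [c])[k]?.getD ' ')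
          = 5 * ((5 : Int) ^ ((cs.length : Int) - 1 - (k : Int)).toNat * pvDig (cs[k]?.getD ' ')) := by
        intro k hk
        have hk' : k < cs.length := List.mem_range.mp hk
        rw [List.getElem?_append_left hk']
        have h2 : (((cs.length + 1 : Nat) : Int) - 1 - (k : Int)).toNat
            = ((cs.length : Int) - 1 - (k : Int)).toNat + 1 := by omega
        rw [h2, pow_succ]
        ring
      rw [List.map_congr_left hterm, List.sum_map_mul_left, ih]
      have hc : (cs ++ [c])[cs.length]?.getD ' ' = c := by simp
      have hexp : (((cs.length + 1 : Nat) : Int) - 1 - (cs.length : Int)).toNat = 0 := by omega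
      simp only [List.map_cons, List.map_nil, List.sum_cons, List.sum_nil, hc, hexp]
      rw [List.foldl_append, List.foldl_cons, List.foldl_nil]
      ring

lemma pvParse_eq_horner (cs : List Char) : parse_snafu (String.ofList cs) = pvHorner cs := by
  rw [parse_snafu]
  simp only [PySem.Str.len_eq, String.toList_ofList]
  rw [pvRange_zero, Int.toNat_natCast, List.foldl_map, PySem.List.foldl_add, zero_add,
    ← pvSum_eq_horner]
  apply congrArg
  apply List.map_congr_left
  intro k hk
  simp only [PySem.Str.pyGet?_natCast, String.toList_ofList]
  rfl

lemma pvHorner_guess (c : Char) (k : Nat) :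
    pvHorner (c :: List.replicate k '=') = pvDig c * 5 ^ k - pvTail k := by
  induction k with
  | zero => simp [pvHorner, pvTail]
  | succ k ih =>
      have hsplit : (c :: List.replicate (k + 1) '=') = (c :: List.replicate k '=') ++ ['='] := by
        rw [List.replicate_succ']
        rfl
      rw [hsplit, pvHorner, List.foldl_append]
      rw [pvHorner] at ih
      rw [ih]
      have hdig : pvDig '=' = -2 := by decide
      simp only [List.foldl_cons, List.foldl_nil, hdig, pvTail]
      ring

-- A's guess for candidate c and the value A compares with val
lemma pvParse_guess (c : Char) (n : Int) :
    parse_snafu ((PySem.List.pyRange 0 (n - 1) 1).foldl (fun g _ => g ++ "=") ("" ++ String.ofList [c]))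
    = pvDig c * 5 ^ (n - 1).toNat - pvTail (n - 1).toNat := by
  rw [pvGuess_eq]
  have hlen : (PySem.List.pyRange 0 (n - 1) 1).length = (n - 1).toNat := by
    rw [pvRange_zero]; simp
  have htl : ("" ++ String.ofList [c]).toList = [c] := by simp
  rw [hlen, htl, pvParse_eq_horner, List.singleton_append, pvHorner_guess]

-- B, with its tail division rewritten through pvTail
lemma pvAlt_eq (val n : Int) :
    find_first_digit_alt val n
    = (if PySem.Int.floordiv (val + pvTail (n - 1).toNat) (5 ^ (n - 1).toNat) > 2 then some "2"
       else SNAFU_VALUES.get? (PySem.Int.floordiv (val + pvTail (n - 1).toNat) (5 ^ (n - 1).toNat))) := by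
  have hmax : (max (n - 1) 0).toNat = (n - 1).toNat := by omega
  rw [find_first_digit_alt]
  simp only [hmax, pvTail_floordiv]

-- ===== VERDICT (by name: the statement is the Claim_ definition above) =====
theorem find_first_digit_spec : Claim_equal_find_first_digit := by
  intro val n _
  unfold Spec_find_first_digit
  have hkeys : SNAFU_DIGITS.keys = ['2', '1', '0', '-', '='] := by decide
  rw [find_first_digit, hkeys]
  simp only [find_first_digit_loop, pvParse_guess]
  rw [pvAlt_eq]
  have d2 : pvDig '2' = 2 := by decide
  have d1 : pvDig '1' = 1 := by decide
  have d0 : pvDig '0' = 0 := by decide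
  have dm : pvDig '-' = -1 := by decide
  have de : pvDig '=' = -2 := by decide
  rw [d2, d1, d0, dm, de]
  set k : Nat := (n - 1).toNat with hk
  set p : Int := 5 ^ k with hpk
  set s : Int := pvTail k with hs
  set d : Int := PySem.Int.floordiv (val + s) p with hd
  have hp : (0 : Int) < p := by rw [hpk]; positivity
  have hcond : ∀ q : Int, (q * p - s ≤ val ↔ q ≤ d) := by
    intro q
    rw [hd, PySem.Int.le_floordiv_iff_mul_le hp]
    omega
  by_cases h2 : 2 * p - s ≤ val
  · rw [if_pos h2]
    have hd2 : 2 ≤ d := (hcond 2).mp (by omega)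
    by_cases hgt : d > 2
    · rw [if_pos hgt]
    · have he2 : d = 2 := by omega
      rw [if_neg hgt, he2]
      decide
  · rw [if_neg h2]
    have hd2 : ¬ 2 ≤ d := fun h => h2 (by have := (hcond 2).mpr h; omega)
    rw [if_neg (by omega : ¬ d > 2)]
    by_cases h1 : 1 * p - s ≤ val
    · rw [if_pos h1]
      have he1 : d = 1 := by have := (hcond 1).mp h1; omega
      rw [he1]
      decide
    · rw [if_neg h1]
      have hd1 : ¬ 1 ≤ d := fun h => h1 (by have := (hcond 1).mpr h; omega)
      by_cases h0 : 0 * p - s ≤ val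
      · rw [if_pos h0]
        have he0 : d = 0 := by have := (hcond 0).mp h0; omega
        rw [he0]
        decide
      · rw [if_neg h0]
        have hd0 : ¬ 0 ≤ d := fun h => h0 (by have := (hcond 0).mpr h; omega)
        by_cases hm : (-1) * p - s ≤ val
        · rw [if_pos hm]
          have hem : d = -1 := by have := (hcond (-1)).mp hm; omega
          rw [hem]
          decide
        · rw [if_neg hm]
          have hdm : ¬ -1 ≤ d := fun h => hm (by have := (hcond (-1)).mpr h; omega)
          by_cases he : (-2) * p - s ≤ val
          · rw [if_pos he]
            have hee : d = -2 := by have := (hcond (-2)).mp he; omega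
            rw [hee]
            decide
          · rw [if_neg he]
            have hde : ¬ -2 ≤ d := fun h => he (by have := (hcond (-2)).mpr h; omega)
            have e : SNAFU_VALUES = PySem.Dict.mk [((2:Int),"2"),(1,"1"),(0,"0"),(-1,"-"),(-2,"=")] := by decide
            rw [e]
            simp only [PySem.Dict.get?_mk_cons, beq_iff_eq]
            split_ifs <;> first | omega | rfl
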